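-- pv_equiv track=rewrite | github.com/Dj-Shortcut/faststack | faststack/tests/thumbnail_view/test_qml_delegate_contract.py | _sanitize_qml
-- ===== SOURCE A (Python) =====
-- def _sanitize_qml(qml_text: str) -> str:
--     """Strip strings and comments while preserving braces and newlines."""
--     out: list[str] = []
--     i = 0
--     in_line_comment = False
--     in_block_comment = False
--     in_string: str | None = None
--
--     while i < len(qml_text):
--         ch = qml_text[i]
--         nxt = qml_text[i + 1] if i + 1 < len(qml_text) else ""
--
--         if in_line_comment:
--             if ch == "\n":
--                 in_line_comment = False
--                 out.append(ch)
--             else: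
--                 out.append(" ")
--             i += 1
--             continue
--
--         if in_block_comment:
--             if ch == "*" and nxt == "/":
--                 # Replace the two closing-comment characters one-for-one so
--                 # brace positions still line up with the original source.
--                 out.extend("  ")
--                 in_block_comment = False
--                 i += 2
--             else:
--                 out.append("\n" if ch == "\n" else " ")
--                 i += 1
--             continue
--
--         if in_string is not None:
--             if ch == "\\" and nxt:
--                 # Preserve character count for escaped pairs as well.
--                 out.extend("  ")
--                 i += 2
--             elif ch == in_string:
--                 out.append(" ")
--                 in_string = None
--                 i += 1
--             else:
--                 out.append("\n" if ch == "\n" else " ")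
--                 i += 1
--             continue
--
--         if ch == "/" and nxt == "/":
--             # Replace both comment opener chars to keep indices aligned.
--             out.extend("  ")
--             in_line_comment = True
--             i += 2
--             continue
--
--         if ch == "/" and nxt == "*":
--             # Replace both comment opener chars to keep indices aligned.
--             out.extend("  ")
--             in_block_comment = True
--             i += 2
--             continue
--
--         if ch in {"'", '"'}:
--             out.append(" ")
--             in_string = ch
--             i += 1
--             continue
--
--         out.append(ch)
--         i += 1
--
--     return "".join(out)
-- ===== SOURCE B (Python) =====
-- # Token-scanner re-implementation: instead of a per-character state machine with
-- # in_line_comment/in_block_comment/in_string flags, dispatch on the token that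
-- # starts at i and consume the whole token region with a dedicated helper.
--
-- def _line_comment(text, i):
--     """Blank from i up to (excluding) the next newline; return (blank, next_index)."""
--     e = text.find('\n', i)
--     if e == -1:
--         e = len(text)
--     return ' ' * (e - i), e
--
-- def _block_comment(text, i):
--     """Blank from i through the closing */ (or EOF); newlines survive."""
--     e = text.find('*/', i)
--     e = len(text) if e == -1 else e + 2
--     return ''.join('\n' if c == '\n' else ' ' for c in text[i:e]), e
--
-- def _string_body(text, quote, i):
--     """Blank a string body from i through the closing quote (or EOF);
--     escape pairs become two spaces, unescaped newlines survive."""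
--     parts = []
--     n = len(text)
--     while i < n:
--         c = text[i]
--         if c == '\\' and i + 1 < n:
--             parts.append('  ')
--             i += 2
--         elif c == quote:
--             parts.append(' ')
--             i += 1
--             break
--         else:
--             parts.append('\n' if c == '\n' else ' ')
--             i += 1
--     return ''.join(parts), i
--
-- def _sanitize_qml(qml_text: str) -> str:
--     out = []
--     i = 0
--     n = len(qml_text)
--     while i < n:
--         if qml_text.startswith('//', i):
--             blanked, i = _line_comment(qml_text, i + 2)
--             out.append('  ' + blanked)
--         elif qml_text.startswith('/*', i):
--             blanked, i = _block_comment(qml_text, i + 2)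
--             out.append('  ' + blanked)
--         elif qml_text[i] in '\'"':
--             blanked, i = _string_body(qml_text, qml_text[i], i + 1)
--             out.append(' ' + blanked)
--         else:
--             out.append(qml_text[i])
--             i += 1
--     return ''.join(out)
-- ===== Notes on version B (the rewrite author's own statement) =====
-- stated objective: alternative
-- what changed: Replaced A's per-character while-loop threading in_line_comment/in_block_comment/in_string flags by a token dispatcher that, at each token start (//, /*, quote), consumes the whole comment/string region with a dedicated scanner helper (find-based for comments) and copies plain text through.
import Mathlib
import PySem

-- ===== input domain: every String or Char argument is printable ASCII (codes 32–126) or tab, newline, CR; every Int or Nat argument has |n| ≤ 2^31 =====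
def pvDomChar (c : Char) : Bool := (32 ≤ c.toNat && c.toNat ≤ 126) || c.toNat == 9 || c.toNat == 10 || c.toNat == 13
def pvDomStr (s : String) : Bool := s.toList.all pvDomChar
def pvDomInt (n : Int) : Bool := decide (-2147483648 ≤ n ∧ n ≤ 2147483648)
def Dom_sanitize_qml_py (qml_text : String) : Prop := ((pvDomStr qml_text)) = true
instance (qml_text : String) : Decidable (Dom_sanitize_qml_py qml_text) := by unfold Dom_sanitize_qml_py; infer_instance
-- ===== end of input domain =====

-- B replaces A's per-character flag state machine with a token dispatcher that consumes
-- each comment/string region with a dedicated scanner (alternative decomposition, same cost).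


-- ===== PORT A =====
-- A's while-loop over index i with flags (in_line_comment, in_block_comment, in_string),
-- transliterated as recursion over the remaining character list carrying the same state;
-- qml_text[i+1] existing ↔ the tail being nonempty.
def sanA : List Char → Bool → Bool → Option Char → List Char
  | [], _, _, _ => []
  | ch :: rest, inLine, inBlock, inStr =>
    if inLine then
      if ch = '\n' then ch :: sanA rest false inBlock inStr
      else ' ' :: sanA rest true inBlock inStr
    else if inBlock then
      match rest with
      | nxt :: rest2 =>
        if ch = '*' ∧ nxt = '/' then ' ' :: ' ' :: sanA rest2 inLine false inStr
        else (if ch = '\n' then '\n' else ' ') :: sanA (nxt :: rest2) inLine true inStr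
      | [] => (if ch = '\n' then '\n' else ' ') :: sanA [] inLine inBlock inStr
    else
      match inStr with
      | some q =>
        match rest with
        | nxt :: rest2 =>
          if ch = '\\' then ' ' :: ' ' :: sanA rest2 inLine inBlock (some q)
          else if ch = q then ' ' :: sanA (nxt :: rest2) inLine inBlock none
          else (if ch = '\n' then '\n' else ' ') :: sanA (nxt :: rest2) inLine inBlock (some q)
        | [] =>
          if ch = q then ' ' :: sanA [] inLine inBlock none
          else (if ch = '\n' then '\n' else ' ') :: sanA [] inLine inBlock (some q)
      | none =>
        match rest with
        | nxt :: rest2 =>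
          if ch = '/' ∧ nxt = '/' then ' ' :: ' ' :: sanA rest2 true inBlock none
          else if ch = '/' ∧ nxt = '*' then ' ' :: ' ' :: sanA rest2 inLine true none
          else if ch = '\'' ∨ ch = '"' then ' ' :: sanA (nxt :: rest2) inLine inBlock (some ch)
          else ch :: sanA (nxt :: rest2) inLine inBlock none
        | [] =>
          if ch = '\'' ∨ ch = '"' then ' ' :: sanA [] inLine inBlock (some ch)
          else ch :: sanA [] inLine inBlock none
  termination_by l _ _ _ => l.length
  decreasing_by all_goals (simp; try omega)

def sanitize_qml_py (qml_text : String) : String :=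
  String.ofList (sanA qml_text.toList false false none)

-- ===== PORT B =====
-- B's helpers: each consumes one token region and returns (its blanked text, the remainder).
-- Python's text.find-based scans are ported as exact left-to-right scans for the same delimiter.

-- _line_comment: blank up to (excluding) the next newline
def lineScan : List Char → List Char × List Char
  | [] => ([], [])
  | c :: rest =>
    if c = '\n' then ([], c :: rest)
    else let p := lineScan rest; (' ' :: p.1, p.2)

-- _block_comment: blank through the closing */ (or EOF); newlines survive
def blockScan : List Char → List Char × List Char
  | [] => ([], [])
  | c :: rest =>
    match rest with
    | nxt :: rest2 =>
      if c = '*' ∧ nxt = '/' then ([' ', ' '], rest2)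
      else let p := blockScan (nxt :: rest2); ((if c = '\n' then '\n' else ' ') :: p.1, p.2)
    | [] => ([if c = '\n' then '\n' else ' '], [])

-- _string_body: blank through the closing quote (or EOF); escape pairs → two spaces
def strScan (q : Char) : List Char → List Char × List Char
  | [] => ([], [])
  | c :: rest =>
    if c = '\\' then
      match rest with
      | nxt :: rest2 => let p := strScan q rest2; (' ' :: ' ' :: p.1, p.2)
      | [] => ([' '], [])
    else if c = q then ([' '], rest)
    else let p := strScan q rest; ((if c = '\n' then '\n' else ' ') :: p.1, p.2)

-- remainder bounds: needed by bMain's termination proof, so they stay above the port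
theorem lineScan_len : ∀ l : List Char, (lineScan l).2.length ≤ l.length := by
  intro l; induction l with
  | nil => simp [lineScan]
  | cons c rest ih => simp only [lineScan]; split <;> simp <;> omega

theorem blockScan_len (l : List Char) : (blockScan l).2.length ≤ l.length := by
  induction hn : l.length using Nat.strongRecOn generalizing l with
  | ind n ih =>
    rcases l with _ | ⟨c, _ | ⟨nxt, rest2⟩⟩
    · rw [blockScan.eq_def]; simp
    · rw [blockScan.eq_def]; simp
    · have ih1 := ih (nxt :: rest2).length (by simp at hn ⊢; omega) (nxt :: rest2) rfl
      rw [blockScan.eq_def]; simp only []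
      split
      · simp at hn ⊢; omega
      · simp at hn ih1 ⊢; omega

theorem strScan_len (q : Char) (l : List Char) : (strScan q l).2.length ≤ l.length := by
  induction hn : l.length using Nat.strongRecOn generalizing l with
  | ind n ih =>
    rcases l with _ | ⟨c, rest⟩
    · rw [strScan.eq_def]; simp
    · by_cases hb : c = '\\'
      · subst hb
        rcases rest with _ | ⟨nxt, rest2⟩
        · rw [strScan.eq_def]; simp
        · have := ih rest2.length (by simp at hn ⊢; omega) rest2 rfl
          rw [strScan.eq_def]; simp at hn this ⊢; omega
      · by_cases hc : c = q
        · subst hc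
          rw [strScan.eq_def]; simp [hb] at hn ⊢; omega
        · have := ih rest.length (by simp at hn; omega) rest rfl
          rw [strScan.eq_def]; simp [hb, hc] at hn this ⊢; omega

-- main dispatcher (_sanitize_qml's while loop with startswith dispatch)
def bMain : List Char → List Char
  | [] => []
  | c :: rest =>
    if c = '\'' ∨ c = '"' then
      ' ' :: ((strScan c rest).1 ++ bMain (strScan c rest).2)
    else
      match rest with
      | nxt :: rest2 =>
        if c = '/' ∧ nxt = '/' then
          ' ' :: ' ' :: ((lineScan rest2).1 ++ bMain (lineScan rest2).2)
        else if c = '/' ∧ nxt = '*' then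
          ' ' :: ' ' :: ((blockScan rest2).1 ++ bMain (blockScan rest2).2)
        else c :: bMain (nxt :: rest2)
      | [] => [c]
  termination_by l => l.length
  decreasing_by
  · have := strScan_len c rest; simp; omega
  · have := lineScan_len rest2; simp; omega
  · have := blockScan_len rest2; simp; omega
  · simp

def sanitize_qml_py_alt (qml_text : String) : String :=
  String.ofList (bMain qml_text.toList)

-- ===== PRECONDITION & SPEC =====
def Spec_sanitize_qml_py (qml_text : String) (out : String) : Prop := out = sanitize_qml_py_alt qml_text
instance (qml_text : String) (out : String) : Decidable (Spec_sanitize_qml_py qml_text out) := by unfold Spec_sanitize_qml_py; infer_instance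

-- ===== CLAIM (what is proved, stated in full; the proofs are below) =====
def Claim_equal_sanitize_qml_py : Prop := ∀ (qml_text : String), Dom_sanitize_qml_py qml_text → Spec_sanitize_qml_py qml_text (sanitize_qml_py qml_text)

-- ===== LEMMAS AND PROOFS =====

-- step (unfolding) lemmas for sanA
theorem sanA_nil (il ib : Bool) (is : Option Char) : sanA [] il ib is = [] := by
  rw [sanA.eq_def]

theorem sanA_L_nl (rest : List Char) (ib : Bool) (is : Option Char) :
    sanA ('\n' :: rest) true ib is = '\n' :: sanA rest false ib is := by
  conv_lhs => rw [sanA.eq_def]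
  simp

theorem sanA_L_other (c : Char) (rest : List Char) (ib : Bool) (is : Option Char) (h : ¬ c = '\n') :
    sanA (c :: rest) true ib is = ' ' :: sanA rest true ib is := by
  conv_lhs => rw [sanA.eq_def]
  simp [h]

theorem sanA_B_close (r : List Char) (is : Option Char) :
    sanA ('*' :: '/' :: r) false true is = ' ' :: ' ' :: sanA r false false is := by
  conv_lhs => rw [sanA.eq_def]
  simp

theorem sanA_B_other (c nxt : Char) (r : List Char) (is : Option Char) (h : ¬ (c = '*' ∧ nxt = '/')) :
    sanA (c :: nxt :: r) false true is
      = (if c = '\n' then '\n' else ' ') :: sanA (nxt :: r) false true is := by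
  conv_lhs => rw [sanA.eq_def]
  simp [h]

theorem sanA_B_one (c : Char) (is : Option Char) :
    sanA [c] false true is = [if c = '\n' then '\n' else ' '] := by
  conv_lhs => rw [sanA.eq_def]
  simp [sanA_nil]

theorem sanA_S_esc (nxt : Char) (r : List Char) (q : Char) :
    sanA ('\\' :: nxt :: r) false false (some q) = ' ' :: ' ' :: sanA r false false (some q) := by
  conv_lhs => rw [sanA.eq_def]
  simp

theorem sanA_S_esc_eof (q : Char) (hq : ¬ '\\' = q) :
    sanA ['\\'] false false (some q) = [' '] := by
  conv_lhs => rw [sanA.eq_def]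
  simp [hq, sanA_nil]

theorem sanA_S_close (q : Char) (r : List Char) (hq : ¬ q = '\\') :
    sanA (q :: r) false false (some q) = ' ' :: sanA r false false none := by
  rcases r with _ | ⟨nxt, r2⟩ <;> (conv_lhs => rw [sanA.eq_def]) <;> simp [hq]

theorem sanA_S_other (c q : Char) (r : List Char) (hb : ¬ c = '\\') (hc : ¬ c = q) :
    sanA (c :: r) false false (some q)
      = (if c = '\n' then '\n' else ' ') :: sanA r false false (some q) := by
  rcases r with _ | ⟨nxt, r2⟩ <;> (conv_lhs => rw [sanA.eq_def]) <;> simp [hb, hc]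

theorem sanA_P_lc (r : List Char) :
    sanA ('/' :: '/' :: r) false false none = ' ' :: ' ' :: sanA r true false none := by
  conv_lhs => rw [sanA.eq_def]
  simp

theorem sanA_P_bc (r : List Char) :
    sanA ('/' :: '*' :: r) false false none = ' ' :: ' ' :: sanA r false true none := by
  conv_lhs => rw [sanA.eq_def]
  simp

theorem sanA_P_quote (c : Char) (r : List Char) (hq : c = '\'' ∨ c = '"') :
    sanA (c :: r) false false none = ' ' :: sanA r false false (some c) := by
  have h2 : ¬ c = '/' := by rcases hq with h | h <;> (subst h; decide)
  rcases r with _ | ⟨nxt, r2⟩ <;> (conv_lhs => rw [sanA.eq_def]) <;> simp [hq, h2]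

theorem sanA_P_other (c nxt : Char) (r : List Char) (hq : ¬ (c = '\'' ∨ c = '"'))
    (h2 : ¬ (c = '/' ∧ nxt = '/')) (h3 : ¬ (c = '/' ∧ nxt = '*')) :
    sanA (c :: nxt :: r) false false none = c :: sanA (nxt :: r) false false none := by
  conv_lhs => rw [sanA.eq_def]
  simp [hq, h2, h3]

theorem sanA_P_one (c : Char) (hq : ¬ (c = '\'' ∨ c = '"')) :
    sanA [c] false false none = [c] := by
  conv_lhs => rw [sanA.eq_def]
  simp [hq, sanA_nil]

-- step (unfolding) lemmas for bMain
theorem bMain_nil : bMain [] = [] := by rw [bMain.eq_def]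

theorem bMain_quote (c : Char) (r : List Char) (hq : c = '\'' ∨ c = '"') :
    bMain (c :: r) = ' ' :: ((strScan c r).1 ++ bMain (strScan c r).2) := by
  conv_lhs => rw [bMain.eq_def]
  simp [hq]

theorem bMain_lc (r : List Char) :
    bMain ('/' :: '/' :: r) = ' ' :: ' ' :: ((lineScan r).1 ++ bMain (lineScan r).2) := by
  conv_lhs => rw [bMain.eq_def]
  simp

theorem bMain_bc (r : List Char) :
    bMain ('/' :: '*' :: r) = ' ' :: ' ' :: ((blockScan r).1 ++ bMain (blockScan r).2) := by
  conv_lhs => rw [bMain.eq_def]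
  simp

theorem bMain_other (c nxt : Char) (r : List Char) (hq : ¬ (c = '\'' ∨ c = '"'))
    (h2 : ¬ (c = '/' ∧ nxt = '/')) (h3 : ¬ (c = '/' ∧ nxt = '*')) :
    bMain (c :: nxt :: r) = c :: bMain (nxt :: r) := by
  conv_lhs => rw [bMain.eq_def]
  simp [hq, h2, h3]

theorem bMain_one (c : Char) (hq : ¬ (c = '\'' ∨ c = '"')) : bMain [c] = [c] := by
  conv_lhs => rw [bMain.eq_def]
  simp [hq]

-- A in line-comment state = lineScan's blank, then A back in plain state on the remainder.
theorem sanA_line (l : List Char) :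
    sanA l true false none = (lineScan l).1 ++ sanA (lineScan l).2 false false none := by
  induction l with
  | nil => simp [sanA_nil, lineScan]
  | cons c rest ih =>
    by_cases h : c = '\n'
    · subst h
      rcases rest with _ | ⟨nxt, rest2⟩
      · rw [sanA_L_nl, sanA_nil]
        simp [lineScan, sanA_P_one '\n' (by decide)]
      · rw [sanA_L_nl]
        have hls : lineScan ('\n' :: nxt :: rest2) = ([], '\n' :: nxt :: rest2) := by
          simp [lineScan]
        rw [hls, sanA_P_other '\n' nxt rest2 (by decide)
            (by rintro ⟨h', -⟩; exact absurd h' (by decide))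
            (by rintro ⟨h', -⟩; exact absurd h' (by decide))]
        simp
    · rw [sanA_L_other c rest false none h]
      simp [lineScan, h, ih]

-- A in block-comment state = blockScan's blank, then A back in plain state.
theorem sanA_block (l : List Char) :
    sanA l false true none = (blockScan l).1 ++ sanA (blockScan l).2 false false none := by
  induction hn : l.length using Nat.strongRecOn generalizing l with
  | ind n ih =>
    rcases l with _ | ⟨c, _ | ⟨nxt, rest2⟩⟩
    · rw [sanA_nil, blockScan.eq_def]; simp [sanA_nil]
    · rw [sanA_B_one, blockScan.eq_def]; simp [sanA_nil]
    · by_cases h : c = '*' ∧ nxt = '/'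
      · obtain ⟨rfl, rfl⟩ := h
        rw [sanA_B_close, blockScan.eq_def]
        simp
      · have ih1 := ih (nxt :: rest2).length (by simp at hn ⊢; omega) (nxt :: rest2) rfl
        rw [sanA_B_other c nxt rest2 none h, blockScan.eq_def]
        simp only [if_neg h, ih1]
        simp

-- A in string state = strScan's blank, then A back in plain state.
theorem sanA_str (q : Char) (hq : q = '\'' ∨ q = '"') (l : List Char) :
    sanA l false false (some q) = (strScan q l).1 ++ sanA (strScan q l).2 false false none := by
  have hqb : ¬ q = '\\' := by rcases hq with h | h <;> (subst h; decide)
  induction hn : l.length using Nat.strongRecOn generalizing l with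
  | ind n ih =>
    rcases l with _ | ⟨c, rest⟩
    · rw [sanA_nil, strScan.eq_def]; simp [sanA_nil]
    · by_cases hb : c = '\\'
      · subst hb
        rcases rest with _ | ⟨nxt, rest2⟩
        · rw [sanA_S_esc_eof q (fun h => hqb h.symm), strScan.eq_def]
          simp [sanA_nil]
        · have ih1 := ih rest2.length (by simp at hn ⊢; omega) rest2 rfl
          rw [sanA_S_esc, strScan.eq_def, ih1]
          simp
      · by_cases hc : c = q
        · subst hc
          rw [sanA_S_close c rest hb, strScan.eq_def]
          simp [hb]
        · have ih1 := ih rest.length (by simp at hn; omega) rest rfl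
          rw [sanA_S_other c q rest hb hc, strScan.eq_def, ih1]
          simp [hb, hc]

-- Main: A's plain state = B's dispatcher.
theorem sanA_eq_bMain (l : List Char) : sanA l false false none = bMain l := by
  induction hn : l.length using Nat.strongRecOn generalizing l with
  | ind n ih =>
    rcases l with _ | ⟨c, rest⟩
    · rw [sanA_nil, bMain_nil]
    · by_cases hq : c = '\'' ∨ c = '"'
      · have hlen := strScan_len c rest
        have ih1 := ih (strScan c rest).2.length (by simp at hn; omega) (strScan c rest).2 rfl
        rw [sanA_P_quote c rest hq, sanA_str c hq rest, ih1, bMain_quote c rest hq]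
      · rcases rest with _ | ⟨nxt, rest2⟩
        · rw [sanA_P_one c hq, bMain_one c hq]
        · by_cases h2 : c = '/' ∧ nxt = '/'
          · obtain ⟨rfl, rfl⟩ := h2
            have ihl := ih (lineScan rest2).2.length
              (by have := lineScan_len rest2; simp at hn; omega) (lineScan rest2).2 rfl
            rw [sanA_P_lc, sanA_line rest2, ihl, bMain_lc]
          · by_cases h3 : c = '/' ∧ nxt = '*'
            · obtain ⟨rfl, rfl⟩ := h3
              have ihb := ih (blockScan rest2).2.length
                (by have := blockScan_len rest2; simp at hn; omega) (blockScan rest2).2 rfl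
              rw [sanA_P_bc, sanA_block rest2, ihb, bMain_bc]
            · have ih1 := ih (nxt :: rest2).length (by simp at hn ⊢; omega) (nxt :: rest2) rfl
              rw [sanA_P_other c nxt rest2 hq h2 h3, ih1, bMain_other c nxt rest2 hq h2 h3]

-- ===== VERDICT (by name: the statement is the Claim_ definition above) =====
theorem sanitize_qml_py_spec : Claim_equal_sanitize_qml_py := by
  intro s _
  unfold Spec_sanitize_qml_py sanitize_qml_py sanitize_qml_py_alt
  rw [sanA_eq_bMain]
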